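-- pv_equiv track=rewrite | github.com/sibirkoda/Python | HomeWork_4/HomeWork_4_task_5.py | IndexZnak
-- ===== SOURCE A (Python) =====
-- def IndexZnak(s):
--     last = len(s)
--     terms = []
--     first = 1
--     while (first < last):
--         l = s.find('-', first, last)
--         if l == -1:
--             break
--         terms.append(l)
--         first = l+1
--     first = 0
--     while (first < last):
--         l = s.find('+', first, last)
--         if l == -1:
--             break
--         terms.append(l)
--         first = l+1
--     return terms
-- ===== SOURCE B (Python) =====
-- def IndexZnak(s):
--     minus = []
--     plus = []
--     for i, ch in enumerate(s):
--         if ch == '-' and i >= 1: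
--             minus.append(i)
--         elif ch == '+':
--             plus.append(i)
--     return minus + plus
-- ===== Notes on version B (the rewrite author's own statement) =====
-- stated objective: simpler
-- what changed: Replaced the two sequential str.find scan loops (restarting find after each hit) with a single enumerate pass that buckets indices into a minus list (i>=1) and a plus list and concatenates them.
import Mathlib
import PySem

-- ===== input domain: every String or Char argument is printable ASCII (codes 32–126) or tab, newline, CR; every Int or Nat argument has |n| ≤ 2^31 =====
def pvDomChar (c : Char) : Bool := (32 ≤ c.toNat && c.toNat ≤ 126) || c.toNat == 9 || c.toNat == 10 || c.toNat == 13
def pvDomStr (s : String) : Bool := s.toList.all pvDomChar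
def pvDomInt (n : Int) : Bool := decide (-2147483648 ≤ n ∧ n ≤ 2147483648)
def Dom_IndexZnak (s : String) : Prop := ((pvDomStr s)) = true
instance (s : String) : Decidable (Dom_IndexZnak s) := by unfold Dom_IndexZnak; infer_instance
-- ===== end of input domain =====

-- B does one enumerate pass bucketing indices instead of A's two restarting str.find scan loops; objective: simpler.

-- ===== PORT A =====
-- the while loop 'l = s.find(c, first, last); …; first = l+1'; first stays a Nat (it is 1/0
-- then l+1 with l ≥ 0), last = len(s); s.find(c, first, last) is Chars.findFrom with end = len(s)
-- s.find(sub, first, len(s)) with end = len(s) scans the whole string (used by pvLoopA's termination)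
lemma findFrom_some_len (cs sub : List Char) (k : Int) :
    PySem.Chars.findFrom cs sub k (some (cs.length : Int)) = PySem.Chars.findFrom cs sub k none := by
  have h0 : ¬ ((cs.length : Int) < (cs.length : Int)) := lt_irrefl _
  have h1 : ¬ ((cs.length : Int) < 0) := by omega
  simp [PySem.Chars.findFrom, h1]

def pvLoopA (cs : List Char) (c : Char) (first : Nat) (acc : List Int) : List Int :=
  if h1 : first < cs.length then
    let l := PySem.Chars.findFrom cs [c] (first : Int) (some (cs.length : Int))
    if h2 : l = -1 then acc
    else pvLoopA cs c (l.toNat + 1) (acc ++ [l])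
  else acc
termination_by cs.length - first
decreasing_by
  have hb := findFrom_some_len cs [c] (first : Int)
  have hf := (PySem.Chars.findFrom_natCast_spec cs [c] first (le_of_lt h1)
    (by rw [← hb]; exact h2)).1
  rw [← hb] at hf
  omega

def IndexZnak (s : String) : List Int :=
  let cs := s.toList
  let terms : List Int := []
  let terms := pvLoopA cs '-' 1 terms
  let terms := pvLoopA cs '+' 0 terms
  terms

-- ===== PORT B =====
-- 'for i, ch in enumerate(s)' with the two buckets minus / plus
def pvLoopB (cs : List Char) (i : Int) (minus plus : List Int) : List Int × List Int :=
  match cs with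
  | [] => (minus, plus)
  | ch :: rest =>
    if ch = '-' ∧ 1 ≤ i then pvLoopB rest (i + 1) (minus ++ [i]) plus
    else if ch = '+' then pvLoopB rest (i + 1) minus (plus ++ [i])
    else pvLoopB rest (i + 1) minus plus

def IndexZnak_alt (s : String) : List Int :=
  let (minus, plus) := pvLoopB s.toList 0 [] []
  minus ++ plus

-- ===== PRECONDITION & SPEC =====
def Spec_IndexZnak (s : String) (out : List Int) : Prop := out = IndexZnak_alt s
instance (s : String) (out : List Int) : Decidable (Spec_IndexZnak s out) := by unfold Spec_IndexZnak; infer_instance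

-- ===== CLAIM (what is proved, stated in full; the proofs are below) =====
def Claim_equal_IndexZnak : Prop := ∀ (s : String), Dom_IndexZnak s → Spec_IndexZnak s (IndexZnak s)

-- ===== LEMMAS AND PROOFS =====

-- all indices (offset k) of occurrences of c in cs
def allIdxs (c : Char) : List Char → Int → List Int
  | [], _ => []
  | a :: rest, k => (if a = c then [k] else []) ++ allIdxs c rest (k + 1)

-- indices of occurrences of c in cs (offset k) that are ≥ lo
def idxs (c : Char) (lo : Int) : List Char → Int → List Int
  | [], _ => []
  | a :: rest, k => (if a = c ∧ lo ≤ k then [k] else []) ++ idxs c lo rest (k + 1)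

lemma idxs_eq_allIdxs (c : Char) (lo : Int) :
    ∀ (cs : List Char) (k : Int), lo ≤ k → idxs c lo cs k = allIdxs c cs k := by
  intro cs
  induction cs with
  | nil => intro k _; rfl
  | cons a rest ih =>
    intro k hk
    simp only [idxs, allIdxs, ih (k + 1) (by omega)]
    by_cases ha : a = c
    · simp [ha, hk]
    · simp [ha]

lemma idxs_drop (c : Char) (lo : Nat) :
    ∀ (cs : List Char) (k : Nat), k ≤ lo →
      idxs c (lo : Int) cs (k : Int) = allIdxs c (cs.drop (lo - k)) (lo : Int) := by
  intro cs
  induction cs with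
  | nil => intro k _; simp [idxs, allIdxs]
  | cons a rest ih =>
    intro k hk
    rcases Nat.eq_or_lt_of_le hk with heq | hlt
    · subst heq
      simp only [Nat.sub_self, List.drop_zero, idxs, allIdxs]
      rw [show ((k : Int) + 1) = ((k + 1 : Nat) : Int) by push_cast; ring] at *
      rw [idxs_eq_allIdxs c (k : Int) rest ((k + 1 : Nat) : Int) (by push_cast; omega)]
      by_cases ha : a = c
      · simp [ha]
      · simp [ha]
    · have : ¬ ((lo : Int) ≤ (k : Int)) := by exact_mod_cast Nat.not_le.mpr hlt
      simp only [idxs, this, and_false, if_false, List.nil_append]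
      rw [show ((k : Int) + 1) = ((k + 1 : Nat) : Int) by push_cast; ring]
      rw [ih (k + 1) (by omega)]
      have hd : (a :: rest).drop (lo - k) = rest.drop (lo - (k + 1)) := by
        have : lo - k = (lo - (k + 1)) + 1 := by omega
        rw [this, List.drop_succ_cons]
      rw [hd]

lemma pvLoopB_eq : ∀ (cs : List Char) (k : Int) (m p : List Int), 0 ≤ k →
    pvLoopB cs k m p = (m ++ idxs '-' 1 cs k, p ++ idxs '+' 0 cs k) := by
  intro cs
  induction cs with
  | nil => intro k m p _; simp [pvLoopB, idxs]
  | cons a rest ih =>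
    intro k m p hk
    by_cases h1 : a = '-' ∧ 1 ≤ k
    · simp only [pvLoopB, ih (k + 1) _ _ (by omega), idxs, h1.1, h1.2]
      have : a ≠ '+' := by rw [h1.1]; decide
      simp [h1.1, h1.2]
    · by_cases h2 : a = '+'
      · have hne : a ≠ '-' := by rw [h2]; decide
        simp only [pvLoopB, if_neg h1, if_pos h2, ih (k + 1) _ _ (by omega), idxs]
        simp [h2, hk]
      · simp only [pvLoopB, if_neg h1, if_neg h2, ih (k + 1) _ _ (by omega), idxs]
        simp [h2]

lemma singleton_prefix_iff (c : Char) (l : List Char) : [c] <+: l ↔ l.head? = some c := by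
  cases l with
  | nil => simp
  | cons a t =>
    constructor
    · rintro ⟨u, hu⟩
      simp at hu
      simp [hu.1]
    · intro h
      simp at h
      exact ⟨t, by simp [h]⟩

lemma prefix_drop_iff (c : Char) (cs : List Char) (m : Nat) :
    [c] <+: cs.drop m ↔ cs[m]? = some c := by
  rw [singleton_prefix_iff, List.head?_drop]

lemma allIdxs_nil_of_not_mem (c : Char) :
    ∀ (l : List Char) (k : Int), c ∉ l → allIdxs c l k = [] := by
  intro l
  induction l with
  | nil => intro k _; rfl
  | cons a rest ih =>
    intro k h
    simp at h
    simp [allIdxs, Ne.symm h.1, ih (k + 1) h.2]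

lemma allIdxs_skip (c : Char) (cs : List Char) :
    ∀ (d first : Nat), first + d ≤ cs.length →
      (∀ i, first ≤ i → i < first + d → cs[i]? ≠ some c) →
      allIdxs c (cs.drop first) (first : Int) = allIdxs c (cs.drop (first + d)) ((first + d : Nat) : Int) := by
  intro d
  induction d with
  | zero => intro first _ _; rfl
  | succ e ih =>
    intro first hlen hno
    have hflen : first < cs.length := by omega
    have hdrop : cs.drop first = cs[first] :: cs.drop (first + 1) :=
      List.drop_eq_getElem_cons hflen
    have hne : cs[first] ≠ c := by
      intro hc
      exact hno first le_rfl (by omega) (by simp [List.getElem?_eq_getElem hflen, hc])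
    rw [hdrop]
    simp only [allIdxs, if_neg hne, List.nil_append]
    rw [show ((first : Int) + 1) = ((first + 1 : Nat) : Int) by push_cast; ring]
    rw [ih (first + 1) (by omega) (fun i h1 h2 => hno i (by omega) (by omega))]
    rw [show first + 1 + e = first + (e + 1) by omega]

lemma singleton_infix_iff (c : Char) (l : List Char) : [c] <:+: l ↔ c ∈ l := by
  constructor
  · intro h
    exact h.subset (List.mem_singleton_self c)
  · intro h
    rcases List.append_of_mem h with ⟨s, t, rfl⟩
    exact ⟨s, t, by simp⟩

lemma pvLoopA_eq (cs : List Char) (c : Char) :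
    ∀ (n first : Nat) (acc : List Int), cs.length - first ≤ n →
      pvLoopA cs c first acc = acc ++ allIdxs c (cs.drop first) (first : Int) := by
  intro n
  induction n with
  | zero =>
    intro first acc hn
    have hge : ¬ first < cs.length := by omega
    have hnil : List.drop first cs = [] := List.drop_eq_nil_of_le (by omega)
    rw [pvLoopA]
    simp [hge, hnil, allIdxs]
  | succ n ih =>
    intro first acc hn
    by_cases hlt : first < cs.length
    · rw [pvLoopA]
      simp only [hlt, dite_true]
      rw [findFrom_some_len]
      by_cases hneg : PySem.Chars.findFrom cs [c] (first : Int) none = -1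
      · simp only [hneg, dite_true]
        have hni := (PySem.Chars.findFrom_natCast_eq_neg_one_iff cs [c] first (le_of_lt hlt)).mp hneg
        rw [singleton_infix_iff] at hni
        rw [allIdxs_nil_of_not_mem c _ _ hni, List.append_nil]
      · simp only [hneg, dite_false]
        obtain ⟨hle, hpref, hmin⟩ :=
          PySem.Chars.findFrom_natCast_spec cs [c] first (le_of_lt hlt) hneg
        set l := PySem.Chars.findFrom cs [c] (first : Int) none with hl
        have hl0 : 0 ≤ l := le_trans (by exact_mod_cast Nat.zero_le first) hle
        have hfm : first ≤ l.toNat := by omega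
        have hgetm : cs[l.toNat]? = some c := (prefix_drop_iff c cs l.toNat).mp hpref
        have hmlt : l.toNat < cs.length := by
          by_contra hge
          rw [List.getElem?_eq_none (by omega)] at hgetm
          simp at hgetm
        have hskip : allIdxs c (cs.drop first) (first : Int)
            = allIdxs c (cs.drop l.toNat) ((l.toNat : Nat) : Int) := by
          have := allIdxs_skip c cs (l.toNat - first) first (by omega)
            (fun i h1 h2 => by
              intro hc
              exact hmin i h1 (by omega) ((prefix_drop_iff c cs i).mpr hc))
          rw [show first + (l.toNat - first) = l.toNat by omega] at this
          exact this
        have hdrop : cs.drop l.toNat = cs[l.toNat] :: cs.drop (l.toNat + 1) :=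
          List.drop_eq_getElem_cons hmlt
        have hgc : cs[l.toNat] = c := by
          rw [List.getElem?_eq_getElem hmlt] at hgetm
          exact Option.some.inj hgetm
        rw [ih (l.toNat + 1) (acc ++ [l]) (by omega)]
        rw [hskip, hdrop]
        simp only [allIdxs, hgc, if_pos]
        rw [show ((l.toNat : Nat) : Int) = l by omega]
        rw [show (l + 1 : Int) = ((l.toNat + 1 : Nat) : Int) by omega]
        simp
    · have hnil : List.drop first cs = [] := List.drop_eq_nil_of_le (by omega)
      rw [pvLoopA]
      simp [hlt, hnil, allIdxs]

-- ===== VERDICT (by name: the statement is the Claim_ definition above) =====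
theorem IndexZnak_spec : Claim_equal_IndexZnak := by
  intro s _
  unfold Spec_IndexZnak IndexZnak IndexZnak_alt
  simp only []
  rw [pvLoopB_eq s.toList 0 [] [] le_rfl]
  simp only [List.nil_append]
  rw [pvLoopA_eq s.toList '-' s.toList.length 1 []]
  rw [pvLoopA_eq s.toList '+' s.toList.length 0]
  · have h1 : idxs '-' 1 s.toList 0 = allIdxs '-' (s.toList.drop 1) 1 := by
      have := idxs_drop '-' 1 s.toList 0 (by omega)
      simpa using this
    have h2 : idxs '+' 0 s.toList 0 = allIdxs '+' s.toList 0 := by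
      have := idxs_eq_allIdxs '+' 0 s.toList 0 le_rfl
      simpa using this
    simp [h1, h2, List.drop_one]
  · omega
  · omega
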